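-- pv_equiv track=rewrite | github.com/CBernjus/adventofcode | 2020/python/day_16.py | find_possible_field_rules
-- ===== SOURCE A (Python) =====
-- def create_valid_filters(rules):
--     return list(map(lambda r: lambda x: (r[1] <= x <= r[2] or r[3] <= x <= r[4]), rules))
--
-- def find_possible_field_rules(tickets, rules):
--     filters = create_valid_filters(rules)
--     possible_rules = [range(len(rules))] * len(tickets[0])
--     for ticket in tickets:
--         for field in range(len(possible_rules)):
--             possible_rules[field] = list(
--                 filter(lambda i: filters[i](ticket[field]), possible_rules[field]))
--
--     return list(map(lambda r: [rules[i] for i in r], possible_rules))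
-- ===== SOURCE B (Python) =====
-- def find_possible_field_rules(tickets, rules):
--     width = len(tickets[0])
--     columns = [[t[f] for t in tickets] for f in range(width)]
--     return [[r for r in rules
--              if all(r[1] <= v <= r[2] or r[3] <= v <= r[4] for v in column)]
--             for column in columns]
-- ===== Notes on version B (the rewrite author's own statement) =====
-- stated objective: simpler
-- what changed: B traverses column-major: it extracts each ticket column once and filters the rules list directly with a short-circuiting all(), instead of A's ticket-major loop that repeatedly re-filters per-field lists of rule indices and maps indices back to rules at the end. Pre_ excludes empty tickets and ragged inputs whose tickets are shorter than the first ticket: there A raises IndexError, except when a field's candidate list is already empty so A's lazy filter never indexes the short ticket and returns, while B (which always reads every column value) raises IndexError.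
-- outside the precondition, e.g. on find_possible_field_rules([[5], []], [('a', 0, 1, 2, 3)]): A returns [[]], B raises IndexError; on find_possible_field_rules([], [('a', 0, 1, 2, 3)]): A raises IndexError, B raises IndexError
import Mathlib
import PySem

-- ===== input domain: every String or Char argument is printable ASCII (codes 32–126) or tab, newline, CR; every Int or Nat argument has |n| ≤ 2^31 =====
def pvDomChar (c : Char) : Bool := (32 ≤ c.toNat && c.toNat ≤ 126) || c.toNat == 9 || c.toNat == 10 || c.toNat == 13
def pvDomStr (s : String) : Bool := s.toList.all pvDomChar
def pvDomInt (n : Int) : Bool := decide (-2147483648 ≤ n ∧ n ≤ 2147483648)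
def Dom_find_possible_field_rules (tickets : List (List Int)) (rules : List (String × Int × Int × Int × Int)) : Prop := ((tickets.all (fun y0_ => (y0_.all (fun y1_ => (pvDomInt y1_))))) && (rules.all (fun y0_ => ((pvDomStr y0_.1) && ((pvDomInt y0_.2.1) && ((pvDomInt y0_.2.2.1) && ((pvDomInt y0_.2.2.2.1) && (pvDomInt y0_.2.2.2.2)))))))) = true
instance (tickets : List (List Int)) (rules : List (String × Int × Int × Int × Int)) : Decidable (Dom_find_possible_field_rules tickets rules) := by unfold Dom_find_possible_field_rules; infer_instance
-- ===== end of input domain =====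

-- B is simpler: it extracts each column once and filters the rules list directly with a
-- short-circuiting all-check, instead of A's ticket-major repeated re-filtering of
-- per-field index lists; equal return value on all inputs A accepts (Pre_).


-- ===== PORT A =====
-- A's rule-filter closure: r[1] <= x <= r[2] or r[3] <= x <= r[4]
def pvFilterA (r : String × Int × Int × Int × Int) (x : Int) : Bool :=
  decide ((r.2.1 ≤ x ∧ x ≤ r.2.2.1) ∨ (r.2.2.2.1 ≤ x ∧ x ≤ r.2.2.2.2))

def pvRuleD : String × Int × Int × Int × Int := ("", 0, 0, 0, 0)

-- inner body of A's ticket loop: possible_rules[field] = filter(...) for every field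
def pvStepA (rules : List (String × Int × Int × Int × Int))
    (pr : List (List Nat)) (ticket : List Int) : List (List Nat) :=
  (List.range pr.length).map (fun field =>
    (pr.getD field []).filter (fun i => pvFilterA (rules.getD i pvRuleD) (ticket.getD field 0)))

def find_possible_field_rules (tickets : List (List Int)) (rules : List (String × Int × Int × Int × Int)) : List (List (String × Int × Int × Int × Int)) :=
  let possible_rules := List.replicate (tickets.headD []).length (List.range rules.length)
  let final := tickets.foldl (pvStepA rules) possible_rules
  final.map (fun r => r.map (fun i => rules.getD i pvRuleD))

-- ===== PORT B =====
def pvOkB (r : String × Int × Int × Int × Int) (v : Int) : Bool :=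
  decide ((r.2.1 ≤ v ∧ v ≤ r.2.2.1) ∨ (r.2.2.2.1 ≤ v ∧ v ≤ r.2.2.2.2))

def find_possible_field_rules_alt (tickets : List (List Int)) (rules : List (String × Int × Int × Int × Int)) : List (List (String × Int × Int × Int × Int)) :=
  let width := (tickets.headD []).length
  let columns := (List.range width).map (fun f => tickets.map (fun t => t.getD f 0))
  columns.map (fun column => rules.filter (fun r => column.all (fun v => pvOkB r v)))

-- ===== PRECONDITION & SPEC =====
-- Pre_ excludes empty tickets and ragged inputs (a ticket shorter than the first): there A
-- raises IndexError, except when a field's candidate list is already empty so A's lazy filter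
-- never indexes the short ticket and returns, while B (which reads every column value) raises.
def Pre_find_possible_field_rules (tickets : List (List Int)) (rules : List (String × Int × Int × Int × Int)) : Prop :=
  tickets ≠ [] ∧ ∀ t ∈ tickets, (tickets.headD []).length ≤ t.length
instance (tickets : List (List Int)) (rules : List (String × Int × Int × Int × Int)) : Decidable (Pre_find_possible_field_rules tickets rules) := by unfold Pre_find_possible_field_rules; infer_instance

def pvWitness_find_possible_field_rules : List (List Int) × (List (String × Int × Int × Int × Int)) :=
  ([[1, 5], [3, 9]], [("a", 0, 2, 5, 6), ("b", 3, 9, 0, 0)])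

def Spec_find_possible_field_rules (tickets : List (List Int)) (rules : List (String × Int × Int × Int × Int)) (out : List (List (String × Int × Int × Int × Int))) : Prop := out = find_possible_field_rules_alt tickets rules
instance (tickets : List (List Int)) (rules : List (String × Int × Int × Int × Int)) (out : List (List (String × Int × Int × Int × Int))) : Decidable (Spec_find_possible_field_rules tickets rules out) := by unfold Spec_find_possible_field_rules; infer_instance

-- ===== CLAIM (what is proved, stated in full; the proofs are below) =====
def Claim_equal_find_possible_field_rules : Prop := ∀ (tickets : List (List Int)) (rules : List (String × Int × Int × Int × Int)), Dom_find_possible_field_rules tickets rules → Pre_find_possible_field_rules tickets rules → Spec_find_possible_field_rules tickets rules (find_possible_field_rules tickets rules)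

-- ===== LEMMAS AND PROOFS =====

theorem pvGetD_map_range {α : Type} (w f : Nat) (g : Nat → α) (d : α) (hf : f < w) :
    ((List.range w).map g).getD f d = g f := by
  simp [List.getD, hf]

-- A's loop over tickets computes, per field, the filter of the starting list by "all tickets pass".
theorem pvLoopA (rules : List (String × Int × Int × Int × Int)) (ts : List (List Int))
    (w : Nat) (g : Nat → List Nat) :
    ts.foldl (pvStepA rules) ((List.range w).map g)
      = (List.range w).map (fun f => (g f).filter
          (fun i => ts.all (fun t => pvFilterA (rules.getD i pvRuleD) (t.getD f 0)))) := by
  induction ts generalizing g with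
  | nil => simp
  | cons t ts ih =>
      have hstep : pvStepA rules ((List.range w).map g) t
          = (List.range w).map (fun f => (g f).filter
              (fun i => pvFilterA (rules.getD i pvRuleD) (t.getD f 0))) := by
        unfold pvStepA
        rw [List.length_map, List.length_range]
        refine List.map_congr_left ?_
        intro f hf
        rw [pvGetD_map_range w f g [] (List.mem_range.mp hf)]
      rw [List.foldl_cons, hstep, ih]
      refine List.map_congr_left ?_
      intro f _
      rw [List.filter_filter]
      refine List.filter_congr ?_
      intro i _
      simp [List.all_cons, Bool.and_comm]

-- selecting rules by filtered index list = filtering the rules list directly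
theorem pvIndexFilter {α : Type} (l : List α) (d : α) (Q : α → Bool) :
    ((List.range l.length).filter (fun i => Q (l.getD i d))).map (fun i => l.getD i d)
      = l.filter Q := by
  induction l with
  | nil => simp
  | cons a l ih =>
      have h1 : ((fun i => Q ((a :: l).getD i d)) ∘ Nat.succ) = (fun i => Q (l.getD i d)) := by
        funext i; simp
      have h2 : ((fun i => (a :: l).getD i d) ∘ Nat.succ) = (fun i => l.getD i d) := by
        funext i; simp
      rw [List.length_cons, List.range_succ_eq_map, List.filter_cons, List.filter_map, h1]
      by_cases h : Q a = true
      · rw [List.getD_cons_zero, if_pos h, List.map_cons, List.map_map, h2, ih,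
          List.filter_cons_of_pos h, List.getD_cons_zero]
      · rw [List.getD_cons_zero, if_neg h, List.map_map, h2, ih,
          List.filter_cons_of_neg (by simpa using h)]

theorem find_possible_field_rules_eq (tickets : List (List Int))
    (rules : List (String × Int × Int × Int × Int)) :
    find_possible_field_rules tickets rules = find_possible_field_rules_alt tickets rules := by
  simp only [find_possible_field_rules, find_possible_field_rules_alt]
  have hrep : List.replicate (tickets.headD []).length (List.range rules.length)
      = (List.range (tickets.headD []).length).map (fun _ => List.range rules.length) := by
    simp [List.map_const']
  rw [hrep, pvLoopA, List.map_map, List.map_map]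
  refine List.map_congr_left ?_
  intro f _
  show ((List.range rules.length).filter _).map _ = _
  rw [pvIndexFilter rules pvRuleD
      (fun r => tickets.all (fun t => pvFilterA r (t.getD f 0)))]
  refine List.filter_congr ?_
  intro r _
  rw [List.all_map]
  rfl

-- ===== VERDICT (by name: the statement is the Claim_ definition above) =====
theorem find_possible_field_rules_spec : Claim_equal_find_possible_field_rules := by
  intro tickets rules _ _
  exact find_possible_field_rules_eq tickets rules
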